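-- pv_equiv track=rewrite | github.com/Yorag/AI-Router-Lite | src/model_mapping.py | _compute_model_changes
-- ===== SOURCE A (Python) =====
-- def _compute_model_changes(
--
--     old_resolved: dict[str, list[str]],
--     new_resolved: dict[str, list[str]]
-- ) -> tuple[list[str], list[str]]:
--     """
--     计算模型变化
--
--     Args:
--         old_resolved: 旧的解析结果 {provider_id: [model_ids]}
--         new_resolved: 新的解析结果 {provider_id: [model_ids]}
--
--     Returns:
--         (新增模型列表, 删除模型列表) - 格式为 "provider_id:model_id"
--     """
--     # 将 {provider_id: [models]} 扁平化为 set of "provider_id:model_id"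
--     old_set: set[str] = set()
--     for provider_id, models in old_resolved.items():
--         for model in models:
--             old_set.add(f"{provider_id}:{model}")
--
--     new_set: set[str] = set()
--     for provider_id, models in new_resolved.items():
--         for model in models:
--             new_set.add(f"{provider_id}:{model}")
--
--     added = sorted(new_set - old_set)
--     removed = sorted(old_set - new_set)
--
--     return added, removed
-- ===== SOURCE B (Python) =====
-- def _compute_model_changes(
--     old_resolved: dict[str, list[str]],
--     new_resolved: dict[str, list[str]]
-- ) -> tuple[list[str], list[str]]:
--     # Flatten each dict into a sorted, duplicate-free list of "provider:model"
--     # strings, then compute both diffs in ONE two-pointer merge pass over the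
--     # two sorted lists (instead of two set differences followed by sorts).
--     old_list = sorted({f"{p}:{m}" for p, ms in old_resolved.items() for m in ms})
--     new_list = sorted({f"{p}:{m}" for p, ms in new_resolved.items() for m in ms})
--
--     added: list[str] = []
--     removed: list[str] = []
--     i = j = 0
--     while i < len(old_list) and j < len(new_list):
--         o, n = old_list[i], new_list[j]
--         if o == n:
--             i += 1
--             j += 1
--         elif o < n:
--             removed.append(o)
--             i += 1
--         else:
--             added.append(n)
--             j += 1
--     removed.extend(old_list[i:])
--     added.extend(new_list[j:])
--     return added, removed
-- ===== Notes on version B (the rewrite author's own statement) =====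
-- stated objective: alternative
-- what changed: Replaces the two global set-difference operations each followed by its own sort with one simultaneous two-pointer merge pass over the two sorted deduplicated flattened lists, emitting added and removed in sorted order in a single scan.
import Mathlib
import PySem

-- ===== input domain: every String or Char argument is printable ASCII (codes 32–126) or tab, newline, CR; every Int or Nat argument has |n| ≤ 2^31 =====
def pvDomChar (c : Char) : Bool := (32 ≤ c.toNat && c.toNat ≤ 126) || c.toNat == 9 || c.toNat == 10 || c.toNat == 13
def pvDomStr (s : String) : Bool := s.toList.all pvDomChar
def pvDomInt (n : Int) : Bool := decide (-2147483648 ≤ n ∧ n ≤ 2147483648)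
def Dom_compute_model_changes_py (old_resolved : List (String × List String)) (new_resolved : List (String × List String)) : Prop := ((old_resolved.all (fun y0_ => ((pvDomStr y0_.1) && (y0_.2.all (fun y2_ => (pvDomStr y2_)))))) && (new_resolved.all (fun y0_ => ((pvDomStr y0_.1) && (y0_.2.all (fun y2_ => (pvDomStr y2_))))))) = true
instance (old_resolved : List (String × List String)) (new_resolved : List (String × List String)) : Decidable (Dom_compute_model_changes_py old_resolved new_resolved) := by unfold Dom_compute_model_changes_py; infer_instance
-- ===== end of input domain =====

-- ===== PORT A =====
-- B replaces A's two set differences (each followed by its own sort) by ONE two-pointer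
-- merge pass over the two sorted deduplicated flattened lists (alternative decomposition).

-- shared A/B-side helper: both Pythons flatten a dict into the set of "provider:model" strings
def pvFlatSet (d : List (String × List String)) : PySem.Set String :=
  (PySem.Dict.ofList d).items.foldl
    (fun s pm => pm.2.foldl (fun s m => PySem.Set.add s (pm.1 ++ ":" ++ m)) s)
    PySem.Set.empty

def compute_model_changes_py (old_resolved : List (String × List String)) (new_resolved : List (String × List String)) : List String × List String :=
  let old_set := pvFlatSet old_resolved
  let new_set := pvFlatSet new_resolved
  let added := PySem.List.sorted (PySem.Set.diff new_set old_set) (fun x => x)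
  let removed := PySem.List.sorted (PySem.Set.diff old_set new_set) (fun x => x)
  (added, removed)

-- ===== PORT B =====
-- the while-loop of Source B: consume the two sorted lists front-to-front, appending to the accumulators
def pvMergeLoop : List String → List String → List String → List String → List String × List String
  | o :: os, n :: ns, added, removed =>
    if o = n then pvMergeLoop os ns added removed
    else if o < n then pvMergeLoop os (n :: ns) added (removed ++ [o])
    else pvMergeLoop (o :: os) ns (added ++ [n]) removed
  | olds, news, added, removed => (added ++ news, removed ++ olds)

def compute_model_changes_py_alt (old_resolved : List (String × List String)) (new_resolved : List (String × List String)) : List String × List String :=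
  let old_list := PySem.List.sorted (pvFlatSet old_resolved) (fun x => x)
  let new_list := PySem.List.sorted (pvFlatSet new_resolved) (fun x => x)
  pvMergeLoop old_list new_list [] []

-- ===== PRECONDITION & SPEC =====
def Spec_compute_model_changes_py (old_resolved : List (String × List String)) (new_resolved : List (String × List String)) (out : List String × List String) : Prop := out = compute_model_changes_py_alt old_resolved new_resolved
instance (old_resolved : List (String × List String)) (new_resolved : List (String × List String)) (out : List String × List String) : Decidable (Spec_compute_model_changes_py old_resolved new_resolved out) := by unfold Spec_compute_model_changes_py; infer_instance

-- ===== CLAIM (what is proved, stated in full; the proofs are below) =====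
def Claim_equal_compute_model_changes_py : Prop := ∀ (old_resolved : List (String × List String)) (new_resolved : List (String × List String)), Dom_compute_model_changes_py old_resolved new_resolved → Spec_compute_model_changes_py old_resolved new_resolved (compute_model_changes_py old_resolved new_resolved)


-- ===== LEMMAS AND PROOFS =====

theorem pvMergeLoop_spec (xs ys added removed : List String) :
    xs.Pairwise (· < ·) → ys.Pairwise (· < ·) →
    pvMergeLoop xs ys added removed =
      (added ++ ys.filter (fun y => !xs.contains y),
       removed ++ xs.filter (fun x => !ys.contains x)) := by
  fun_induction pvMergeLoop xs ys added removed
  case case1 =>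
    rename_i os n ns added removed ih
    intro hx hy
    have hno : ∀ x ∈ os, n < x := fun _ h => List.rel_of_pairwise_cons hx h
    have hnn : ∀ y ∈ ns, n < y := fun _ h => List.rel_of_pairwise_cons hy h
    rw [ih hx.of_cons hy.of_cons]
    have h1 : List.filter (fun y => !((n :: os).contains y)) (n :: ns)
        = List.filter (fun y => !os.contains y) ns := by
      have hhead : (!((n :: os).contains n)) = false := by simp
      rw [List.filter_cons, hhead]
      simp only [Bool.false_eq_true, if_false]
      apply List.filter_congr
      intro y hyy
      have : ¬ (y = n) := (hnn y hyy).ne'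
      simp [this]
    have h2 : List.filter (fun x => !((n :: ns).contains x)) (n :: os)
        = List.filter (fun x => !ns.contains x) os := by
      have hhead : (!((n :: ns).contains n)) = false := by simp
      rw [List.filter_cons, hhead]
      simp only [Bool.false_eq_true, if_false]
      apply List.filter_congr
      intro x hxx
      have : ¬ (x = n) := (hno x hxx).ne'
      simp [this]
    rw [h1, h2]
  case case2 =>
    rename_i o os n ns added removed hne hlt ih
    intro hx hy
    have hoo : ∀ x ∈ os, o < x := fun _ h => List.rel_of_pairwise_cons hx h
    have hnn : ∀ y ∈ ns, n < y := fun _ h => List.rel_of_pairwise_cons hy h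
    rw [ih hx.of_cons hy]
    have hno : o ∉ n :: ns := by
      intro h
      rcases List.mem_cons.mp h with h | h
      · exact hne h
      · exact absurd (lt_trans hlt (hnn o h)) (lt_irrefl o)
    have h1 : List.filter (fun y => !((o :: os).contains y)) (n :: ns)
        = List.filter (fun y => !os.contains y) (n :: ns) := by
      apply List.filter_congr
      intro y hyy
      have : ¬ (y = o) := fun h => hno (h ▸ hyy)
      simp [this]
    have h2 : List.filter (fun x => !((n :: ns).contains x)) (o :: os)
        = o :: List.filter (fun x => !((n :: ns).contains x)) os := by
      rw [List.filter_cons, if_pos (by simp [List.contains_eq_mem, hno])]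
    rw [h1, h2]
    simp [List.append_assoc]
  case case3 =>
    rename_i o os n ns added removed hne hlt ih
    intro hx hy
    have hgt : n < o := lt_of_le_of_ne (not_lt.mp hlt) (Ne.symm hne)
    have hoo : ∀ x ∈ os, o < x := fun _ h => List.rel_of_pairwise_cons hx h
    have hnn : ∀ y ∈ ns, n < y := fun _ h => List.rel_of_pairwise_cons hy h
    rw [ih hx hy.of_cons]
    have hno : n ∉ o :: os := by
      intro h
      rcases List.mem_cons.mp h with h | h
      · exact hne h.symm
      · exact absurd (lt_trans hgt (hoo n h)) (lt_irrefl n)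
    have h1 : List.filter (fun y => !((o :: os).contains y)) (n :: ns)
        = n :: List.filter (fun y => !((o :: os).contains y)) ns := by
      rw [List.filter_cons, if_pos (by simp [List.contains_eq_mem, hno])]
    have h2 : List.filter (fun x => !((n :: ns).contains x)) (o :: os)
        = List.filter (fun x => !ns.contains x) (o :: os) := by
      apply List.filter_congr
      intro x hxx
      have : ¬ (x = n) := fun h => hno (h ▸ hxx)
      simp [this]
    rw [h1, h2]
    simp [List.append_assoc]
  case case4 =>
    rename_i olds news added removed himp
    intro _ _
    rcases olds with _ | ⟨o, os⟩
    · simp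
    rcases news with _ | ⟨n, ns⟩
    · simp
    · exact (himp o os n ns rfl rfl).elim

theorem pvFlatSet_eq_ofList (d : List (String × List String)) :
    pvFlatSet d = PySem.Set.ofList
      ((PySem.Dict.ofList d).items.flatMap (fun pm => pm.2.map (fun m => pm.1 ++ ":" ++ m))) := by
  rw [pvFlatSet, PySem.Set.ofList_eq_foldl, List.foldl_flatMap]
  simp [List.foldl_map]

-- sorted of a filtered set-list = filter of the sorted set-list
theorem pvSortFilter (L : List String) (p : String → Bool) :
    PySem.List.sorted ((PySem.Set.ofList L).filter p) (fun x => x)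
      = (PySem.List.sorted (PySem.Set.ofList L) (fun x => x)).filter p := by
  apply PySem.List.sorted_eq_of_perm_of_pairwise_lt
  · exact (PySem.List.sorted_perm _ _ _).filter p
  · exact (PySem.List.sorted_ofList_pairwise_lt L).filter p

theorem pvContains_sorted (L : List String) (y : String) :
    (PySem.List.sorted (PySem.Set.ofList L) (fun x => x)).contains y
      = (PySem.Set.ofList L).contains y := by
  simp [List.contains_eq_mem, PySem.List.mem_sorted]


-- ===== VERDICT (by name: the statement is the Claim_ definition above) =====
theorem compute_model_changes_py_spec : Claim_equal_compute_model_changes_py := by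
  intro o n _
  unfold Spec_compute_model_changes_py compute_model_changes_py compute_model_changes_py_alt
  simp only
  rw [pvFlatSet_eq_ofList o, pvFlatSet_eq_ofList n]
  set L1 := (PySem.Dict.ofList o).items.flatMap (fun pm => pm.2.map (fun m => pm.1 ++ ":" ++ m)) with hL1
  set L2 := (PySem.Dict.ofList n).items.flatMap (fun pm => pm.2.map (fun m => pm.1 ++ ":" ++ m)) with hL2
  rw [pvMergeLoop_spec _ _ _ _ (PySem.List.sorted_ofList_pairwise_lt L1) (PySem.List.sorted_ofList_pairwise_lt L2)]
  simp only [List.nil_append]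
  have hdiff : ∀ (A B : List String), PySem.Set.diff A B = A.filter (fun x => !B.contains x) := fun _ _ => rfl
  rw [hdiff, hdiff]
  have hc1 : (fun y => !(PySem.List.sorted (PySem.Set.ofList L1) fun x => x).contains y)
      = (fun y => !(PySem.Set.ofList L1).contains y) := by
    funext y; rw [pvContains_sorted]
  have hc2 : (fun y => !(PySem.List.sorted (PySem.Set.ofList L2) fun x => x).contains y)
      = (fun y => !(PySem.Set.ofList L2).contains y) := by
    funext y; rw [pvContains_sorted]
  rw [hc1, hc2, pvSortFilter, pvSortFilter]
  rfl
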